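-- pv_equiv track=rewrite | github.com/OverkillGuy/adventofcode2020 | src/aoc2020/3.py | day3_check
-- ===== SOURCE A (Python) =====
-- def day3_check(grid, delta):
--     """Check how many trees were seen moving with delta vec on 2D grid wrapping horizontally"""
--     position = (0, 0)
--     grid_height, grid_width = len(grid), len(grid[0])
--     num_trees = 0
--     while position[0] < grid_height:
--         if grid[position[0]][position[1]] == "#":
--             num_trees += 1
--         position = (position[0] + delta[0], (position[1] + delta[1]) % grid_width)
--     return num_trees
-- ===== SOURCE B (Python) =====
-- def day3_check(grid, delta):
--     """Check how many trees were seen moving with delta vec on 2D grid wrapping horizontally"""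
--     width = len(grid[0])
--     # the visited column (step*delta[1]) % width is periodic in the step index with
--     # period width // gcd(delta[1] % width, width); steps in one residue class mod the
--     # period all look at the same column, and their rows form one strided slice.
--     a, b = width, delta[1] % width
--     while b:
--         a, b = b, a % b
--     period = width // a
--     num_trees = 0
--     for phase in range(period):
--         col = (phase * delta[1]) % width
--         num_trees += sum(row[col] == "#" for row in grid[phase * delta[0]::period * delta[0]])
--     return num_trees
-- ===== Notes on version B (the rewrite author's own statement) =====
-- stated objective: alternative
-- what changed: B replaces A's step-by-step walk carrying a (row, col) position with a period decomposition: the visited column (step*d1) % width repeats with period width // gcd(d1 % width, width), so B loops over the phases of that period, fixes one column per phase, and counts '#' in that column over the strided row slice grid[phase*d0 :: period*d0].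
import Mathlib
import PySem

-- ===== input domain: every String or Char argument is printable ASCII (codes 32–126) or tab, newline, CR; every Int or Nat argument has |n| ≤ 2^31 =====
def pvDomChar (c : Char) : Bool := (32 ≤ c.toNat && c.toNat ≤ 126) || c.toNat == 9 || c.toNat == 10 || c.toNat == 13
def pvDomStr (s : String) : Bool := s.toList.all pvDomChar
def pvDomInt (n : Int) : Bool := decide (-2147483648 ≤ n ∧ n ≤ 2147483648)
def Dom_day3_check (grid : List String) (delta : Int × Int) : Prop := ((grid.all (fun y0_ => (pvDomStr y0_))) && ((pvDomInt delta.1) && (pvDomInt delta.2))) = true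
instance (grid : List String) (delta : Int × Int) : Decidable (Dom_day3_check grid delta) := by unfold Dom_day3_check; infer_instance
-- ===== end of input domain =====

-- B replaces A's step-by-step walk over a mutable (row, col) position with a period
-- decomposition: the visited column is periodic in the step index with period
-- width // gcd(d1 % width, width); B counts one fixed column per phase over the strided
-- row slice grid[phase*d0 :: period*d0] (objective: alternative algorithm, same cost).

-- ===== PORT A =====
-- the cell test grid[r][c] == "#" (false stands for the out-of-range IndexError, excluded by Pre_)
def pvCellA (grid : List String) (r c : Int) : Bool :=
  match PySem.List.pyGet? grid r with
  | some row =>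
    match PySem.Str.pyGet? row c with
    | some ch => ch = '#'
    | none => false
  | none => false

-- the while-loop; fuel only makes the recursion total, one unit is spent per iteration
def pvLoopA (grid : List String) (d0 d1 w h : Int) : Nat → Int → Int → Int → Int
  | 0, _, _, acc => acc
  | fuel + 1, r, c, acc =>
    if r < h then
      pvLoopA grid d0 d1 w h fuel (r + d0) (PySem.Int.mod (c + d1) w)
        (if pvCellA grid r c then acc + 1 else acc)
    else acc

def day3_check (grid : List String) (delta : Int × Int) : Int :=
  let h : Int := PySem.List.len grid
  let w : Int := PySem.Str.len ((PySem.List.pyGet? grid 0).getD "")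
  pvLoopA grid delta.1 delta.2 w h (grid.length + 1) 0 0 0

-- ===== PORT B =====
-- the cell test row[col] == "#" of Source B's inner generator (false stands for IndexError, excluded by Pre_)
def pvCellRow (row : String) (c : Int) : Bool :=
  match PySem.Str.pyGet? row c with
  | some ch => ch = '#'
  | none => false

-- Source B's Euclid while-loop 'while b: a, b = b, a % b'; its values here are nonnegative
-- Python ints (a = width > 0, b = delta[1] % width ≥ 0), so this Nat recursion is exact
-- on that domain
def pvGcdLoop : Nat → Nat → Nat
  | a, 0 => a
  | a, b + 1 => pvGcdLoop (b + 1) (a % (b + 1))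
termination_by a b => b
decreasing_by exact Nat.mod_lt _ (Nat.succ_pos _)

def day3_check_alt (grid : List String) (delta : Int × Int) : Int :=
  let w : Int := PySem.Str.len ((PySem.List.pyGet? grid 0).getD "")
  -- Python raises ZeroDivisionError on '% width' / '// a' only when width = 0, excluded by Pre_
  let g : Int := (pvGcdLoop w.toNat (PySem.Int.mod delta.2 w).toNat : Int)
  let period : Int := PySem.Int.floordiv w g
  (PySem.List.pyRange 0 period 1).foldl
    (fun total phase =>
      total +
        -- grid[phase*d0 :: period*d0]; .getD [] stands for the step-0 ValueError, excluded by Pre_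
        ((PySem.List.slice? grid (some (phase * delta.1)) none (period * delta.1)).getD []).foldl
          (fun s row => s + (if pvCellRow row (PySem.Int.mod (phase * delta.2) w) then 1 else 0)) 0)
    0

-- ===== PRECONDITION & SPEC =====
-- Pre_ = exactly the inputs A returns on: nonempty grid, nonempty first row, downward step
-- delta.1 > 0 (else A loops forever or walks off the top), and every visited cell in range
-- (else A raises IndexError; B raises on exactly the same grids).
def Pre_day3_check (grid : List String) (delta : Int × Int) : Prop :=
  grid ≠ [] ∧ 0 < delta.1 ∧
  0 < PySem.Str.len ((PySem.List.pyGet? grid 0).getD "") ∧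
  ∀ k ∈ List.range grid.length,
    (k : Int) * delta.1 < (grid.length : Int) →
    (PySem.Int.mod ((k : Int) * delta.2)
        (PySem.Str.len ((PySem.List.pyGet? grid 0).getD ""))).toNat <
      (grid.getD (((k : Int) * delta.1).toNat) "").toList.length
instance (grid : List String) (delta : Int × Int) : Decidable (Pre_day3_check grid delta) := by
  unfold Pre_day3_check; infer_instance

def pvWitness_day3_check : List String × (Int × Int) := (["..#", "#.#", ".#."], (1, 3))

def Spec_day3_check (grid : List String) (delta : Int × Int) (out : Int) : Prop := out = day3_check_alt grid delta
instance (grid : List String) (delta : Int × Int) (out : Int) : Decidable (Spec_day3_check grid delta out) := by unfold Spec_day3_check; infer_instance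

-- ===== CLAIM (what is proved, stated in full; the proofs are below) =====
def Claim_equal_day3_check : Prop := ∀ (grid : List String) (delta : Int × Int), Dom_day3_check grid delta → Pre_day3_check grid delta → Spec_day3_check grid delta (day3_check grid delta)

-- ===== LEMMAS AND PROOFS =====

-- the 0/1 indicator of step j (row j*d0, column (j*d1) mod w)
def pvHit (grid : List String) (d0 d1 w : Int) (j : Nat) : Int :=
  if pvCellA grid ((j : Int) * d0) (PySem.Int.mod ((j : Int) * d1) w) then 1 else 0

-- a summing fold is the accumulator plus the sum of the mapped terms
theorem pvFoldlSum {α : Type} (f : α → Int) (l : List α) (a : Int) :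
    l.foldl (fun acc x => acc + f x) a = a + (l.map f).sum := by
  induction l generalizing a with
  | nil => simp
  | cons x xs ih => simp only [List.foldl_cons, List.map_cons, List.sum_cons, ih]; ring

-- ceiling count: k*d < x iff k < ceil(x/d), for 0 < d
theorem pvCeilIff (x d : Int) (hd : 0 < d) (k : Nat) :
    (k : Int) * d < x ↔ k < ((x + d - 1) / d).toNat := by
  rw [Int.lt_toNat]
  constructor
  · intro hk
    have : (k : Int) + 1 ≤ (x + d - 1) / d := by
      rw [Int.le_ediv_iff_mul_le hd]; nlinarith
    omega
  · intro hk
    have : (k : Int) + 1 ≤ (x + d - 1) / d := by omega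
    rw [Int.le_ediv_iff_mul_le hd] at this; nlinarith

-- the column recurrence of A in closed form
theorem pvModStep (a d1 w : Int) (hw : 0 < w) :
    PySem.Int.mod (PySem.Int.mod a w + d1) w = PySem.Int.mod (a + d1) w := by
  rw [PySem.Int.mod_eq_emod_of_pos hw, PySem.Int.mod_eq_emod_of_pos hw,
    PySem.Int.mod_eq_emod_of_pos hw]
  exact Int.emod_add_emod a w d1 ▸ rfl

-- A's while-loop, started at step k, adds the indicator sum of the remaining steps
theorem pvLoopA_sum (grid : List String) (d0 d1 w : Int) (hd : 0 < d0) (hw : 0 < w) (N : Nat)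
    (hN : ∀ k : Nat, (k : Int) * d0 < (grid.length : Int) ↔ k < N) :
    ∀ (fuel k : Nat) (acc : Int), N ≤ k + fuel →
      pvLoopA grid d0 d1 w (grid.length : Int) fuel ((k : Int) * d0)
          (PySem.Int.mod ((k : Int) * d1) w) acc
        = acc + ((List.range' k (N - k)).map (pvHit grid d0 d1 w)).sum := by
  intro fuel
  induction fuel with
  | zero =>
    intro k acc hk
    have h0 : N - k = 0 := by omega
    rw [h0]
    simp [pvLoopA]
  | succ m ih =>
    intro k acc hk
    by_cases hlt : (k : Int) * d0 < (grid.length : Int)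
    · have hkN : k < N := (hN k).mp hlt
      have h1 : (k : Int) * d0 + d0 = ((k + 1 : Nat) : Int) * d0 := by push_cast; ring
      have h2 : PySem.Int.mod (PySem.Int.mod ((k : Int) * d1) w + d1) w
          = PySem.Int.mod (((k + 1 : Nat) : Int) * d1) w := by
        rw [pvModStep _ _ _ hw]; congr 1; push_cast; ring
      have h3 : N - k = (N - (k + 1)) + 1 := by omega
      rw [pvLoopA, if_pos hlt, h1, h2, ih (k + 1) _ (by omega), h3, List.range'_succ]
      simp only [List.map_cons, List.sum_cons, pvHit]
      by_cases hc : pvCellA grid ((k : Int) * d0) (PySem.Int.mod ((k : Int) * d1) w) <;>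
        simp [hc] <;> ring
    · have hge : N ≤ k := by
        by_contra hcon
        exact hlt ((hN k).mpr (by omega))
      have h0 : N - k = 0 := by omega
      rw [pvLoopA, if_neg hlt, h0]
      simp

-- Source B's Euclid loop computes the gcd
theorem pvGcdLoop_eq (a b : Nat) : pvGcdLoop a b = Nat.gcd b a := by
  fun_induction pvGcdLoop a b with
  | case1 a => simp
  | case2 a b ih => rw [ih]; exact (Nat.gcd_rec (b + 1) a).symm

-- every filterMap that always succeeds is a map
theorem pvFilterMapMap {α β : Type} (l : List α) (g : α → Option β) (f : α → β)
    (h : ∀ x ∈ l, g x = some (f x)) : l.filterMap g = l.map f := by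
  induction l with
  | nil => simp
  | cons x xs ih =>
    rw [List.filterMap_cons, h x (by simp), List.map_cons, ih (fun y hy => h y (by simp [hy]))]

-- list sums as Finset sums
theorem pvSumRange (f : Nat → Int) (n : Nat) :
    ((List.range n).map f).sum = ∑ k ∈ Finset.range n, f k := by
  induction n with
  | zero => simp
  | succ m ih => rw [List.range_succ, Finset.sum_range_succ]; simp [ih]

-- the strided tail slice xs[a::st] for 0 ≤ a, 0 < st, evaluated
theorem pvSliceEval (xs : List String) (a st : Int) (h0 : 0 ≤ a) (hst : 0 < st) :
    (PySem.List.slice? xs (some a) none st).getD []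
      = (List.range (if a < (xs.length : Int)
            then (((xs.length : Int) - a + st - 1) / st).toNat else 0)).map
          (fun k : Nat => xs.getD (a + st * (k : Int)).toNat "") := by
  have hstep0 : st ≠ 0 := by omega
  have hstneg : ¬ st < 0 := by omega
  have haneg : ¬ a < 0 := by omega
  by_cases hab : a < (xs.length : Int)
  · have hmin : min a (xs.length : Int) = a := min_eq_left (le_of_lt hab)
    simp only [PySem.List.slice?, PySem.List.sliceIndices, if_neg hstep0, if_neg hstneg,
      if_neg haneg, hmin, if_pos hst, if_pos hab, if_pos hab, Option.getD_some]
    apply pvFilterMapMap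
    intro k hk
    rw [List.mem_range] at hk
    have hlt : (k : Int) * st < (xs.length : Int) - a := by
      rw [pvCeilIff ((xs.length : Int) - a) st hst k]; exact hk
    have hidx : a + st * (k : Int) < (xs.length : Int) := by nlinarith
    have hnn : 0 ≤ a + st * (k : Int) := by positivity
    have hn : (a + st * (k : Int)).toNat < xs.length := by omega
    rw [List.getElem?_eq_getElem hn, List.getD_eq_getElem xs "" hn]
  · have hmin : min a (xs.length : Int) = (xs.length : Int) :=
      min_eq_right (le_of_not_gt hab)
    simp only [PySem.List.slice?, PySem.List.sliceIndices, if_neg hstep0, if_neg hstneg,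
      if_neg haneg, hmin, if_pos hst, lt_irrefl, if_neg hab, if_false, Option.getD_some]
    simp

-- regrouping the steps 0..N-1 by their residue class modulo the period P
theorem pvRegroup (F : Nat → Int) (P N : Nat) (hP : 0 < P) (M : Nat → Nat)
    (hM : ∀ j, j < P → ∀ m, (m < M j ↔ j + m * P < N)) :
    ∑ j ∈ Finset.range P, ∑ m ∈ Finset.range (M j), F (j + m * P)
      = ∑ k ∈ Finset.range N, F k := by
  rw [Finset.sum_sigma']
  apply Finset.sum_nbij' (i := fun x => x.1 + x.2 * P) (j := fun k => ⟨k % P, k / P⟩)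
  · intro x hx
    rw [Finset.mem_sigma, Finset.mem_range, Finset.mem_range] at hx
    rw [Finset.mem_range]
    exact (hM x.1 hx.1 x.2).mp hx.2
  · intro k hk
    rw [Finset.mem_range] at hk
    rw [Finset.mem_sigma, Finset.mem_range, Finset.mem_range]
    refine ⟨Nat.mod_lt _ hP, ?_⟩
    rw [hM (k % P) (Nat.mod_lt _ hP) (k / P), Nat.mod_add_div']
    exact hk
  · intro x hx
    rw [Finset.mem_sigma, Finset.mem_range, Finset.mem_range] at hx
    have h1 : (x.1 + x.2 * P) % P = x.1 := by
      rw [Nat.add_mul_mod_self_right, Nat.mod_eq_of_lt hx.1]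
    have h2 : (x.1 + x.2 * P) / P = x.2 := by
      rw [Nat.add_mul_div_right _ _ hP, Nat.div_eq_of_lt hx.1, Nat.zero_add]
    exact Sigma.ext h1 (by rw [h2])
  · intro k hk
    exact Nat.mod_add_div' k P
  · intro x hx
    rfl

-- B's outer fold, for any positive period p with w ∣ p*d1, is the full indicator sum
theorem pvBsideEval (grid : List String) (d0 d1 w p : Int) (N : Nat)
    (hd : 0 < d0) (hw : 0 < w)
    (hN : ∀ k : Nat, (k : Int) * d0 < (grid.length : Int) ↔ k < N)
    (hppos : 0 < p) (hwdvd : w ∣ p * d1) :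
    ((PySem.List.pyRange 0 p 1).foldl
      (fun total phase =>
        total +
          ((PySem.List.slice? grid (some (phase * d0)) none (p * d0)).getD []).foldl
            (fun s row => s + (if pvCellRow row (PySem.Int.mod (phase * d1) w) then 1 else 0)) 0)
      0)
      = ∑ k ∈ Finset.range N, pvHit grid d0 d1 w k := by
  have hPcast : ((p.toNat : Int)) = p := Int.toNat_of_nonneg (le_of_lt hppos)
  have hPpos : 0 < p.toNat := by omega
  have hstpos : 0 < p * d0 := mul_pos hppos hd
  -- the per-phase step count
  have hM : ∀ j, j < p.toNat → ∀ m : Nat,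
      (m < (if (j : Int) * d0 < (grid.length : Int)
          then (((grid.length : Int) - (j : Int) * d0 + p * d0 - 1) / (p * d0)).toNat else 0)
        ↔ j + m * p.toNat < N) := by
    intro j _ m
    have hcastt : ((j + m * p.toNat : Nat) : Int) * d0 = (j : Int) * d0 + (m : Int) * (p * d0) := by
      push_cast
      rw [hPcast]
      ring
    by_cases hjlt : (j : Int) * d0 < (grid.length : Int)
    · simp only [if_pos hjlt]
      rw [← pvCeilIff ((grid.length : Int) - (j : Int) * d0) (p * d0) hstpos m,
        ← hN (j + m * p.toNat), hcastt]
      constructor <;> intro h <;> linarith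
    · simp only [if_neg hjlt]
      have hjN : N ≤ j := by
        by_contra hcon
        exact hjlt ((hN j).mpr (by omega))
      constructor
      · intro h; exact absurd h (Nat.not_lt_zero m)
      · intro h; omega
  -- the column is the same across one residue class
  have hcol : ∀ (j m : Nat),
      PySem.Int.mod (((j + m * p.toNat : Nat) : Int) * d1) w
        = PySem.Int.mod ((j : Int) * d1) w := by
    intro j m
    obtain ⟨t, ht⟩ := hwdvd
    have hexp : ((j + m * p.toNat : Nat) : Int) * d1 = (j : Int) * d1 + w * ((m : Int) * t) := by
      push_cast
      rw [hPcast]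
      nlinarith [ht]
    rw [hexp, PySem.Int.mod_eq_emod_of_pos hw, PySem.Int.mod_eq_emod_of_pos hw,
      Int.add_mul_emod_self_left]
  rw [PySem.List.pyRange_one 0 p, pvFoldlSum, zero_add, List.map_map, sub_zero, pvSumRange,
    ← pvRegroup (pvHit grid d0 d1 w) p.toNat N hPpos _ hM]
  apply Finset.sum_congr rfl
  intro j hj
  rw [Finset.mem_range] at hj
  simp only [Function.comp, zero_add]
  -- the inner fold of phase j is the indicator sum of its residue class
  rw [pvSliceEval grid ((j : Int) * d0) (p * d0)
      (mul_nonneg (Int.natCast_nonneg j) (le_of_lt hd)) hstpos,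
    pvFoldlSum, zero_add, List.map_map, pvSumRange]
  apply Finset.sum_congr rfl
  intro m hm
  rw [Finset.mem_range] at hm
  have hkN : j + m * p.toNat < N := (hM j hj m).mp hm
  have hr : ((j + m * p.toNat : Nat) : Int) * d0 = (j : Int) * d0 + (p * d0) * (m : Int) := by
    push_cast
    rw [hPcast]
    ring
  have hrlt : (j : Int) * d0 + (p * d0) * (m : Int) < (grid.length : Int) := by
    rw [← hr]; exact (hN _).mpr hkN
  have hrnn : 0 ≤ (j : Int) * d0 + (p * d0) * (m : Int) := by
    rw [← hr]; exact mul_nonneg (Int.natCast_nonneg _) (le_of_lt hd)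
  have hidx : ((j : Int) * d0 + (p * d0) * (m : Int)).toNat < grid.length := by omega
  have hsome : PySem.List.pyGet? grid ((j : Int) * d0 + (p * d0) * (m : Int))
      = some (grid.getD ((j : Int) * d0 + (p * d0) * (m : Int)).toNat "") := by
    conv_lhs => rw [show ((j : Int) * d0 + (p * d0) * (m : Int))
        = ((((j : Int) * d0 + (p * d0) * (m : Int)).toNat : Nat) : Int) from by omega]
    rw [PySem.List.pyGet?_natCast, List.getElem?_eq_getElem hidx,
      List.getD_eq_getElem grid "" hidx]
  simp only [Function.comp, pvHit, hcol j m, hr]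
  have hcell : pvCellA grid ((j : Int) * d0 + (p * d0) * (m : Int))
        (PySem.Int.mod ((j : Int) * d1) w)
      = pvCellRow (grid.getD ((j : Int) * d0 + (p * d0) * (m : Int)).toNat "")
        (PySem.Int.mod ((j : Int) * d1) w) := by
    unfold pvCellA pvCellRow
    rw [hsome]
  rw [hcell]

-- ===== VERDICT (by name: the statement is the Claim_ definition above) =====
theorem day3_check_spec : Claim_equal_day3_check := by
  intro grid delta _ hpre
  obtain ⟨hne, hd, hw, -⟩ := hpre
  unfold Spec_day3_check day3_check day3_check_alt
  simp only [PySem.List.len_eq]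
  set d0 := delta.1 with hd0
  set d1 := delta.2 with hd1
  set w : Int := PySem.Str.len ((PySem.List.pyGet? grid 0).getD "") with hwdef
  have hh : 0 < (grid.length : Int) := by
    have := List.length_pos_iff.mpr hne; exact_mod_cast this
  set N : Nat := (((grid.length : Int) + d0 - 1) / d0).toNat with hNdef
  have hN : ∀ k : Nat, (k : Int) * d0 < (grid.length : Int) ↔ k < N :=
    fun k => pvCeilIff (grid.length : Int) d0 hd k
  -- A side: the loop sums the step indicators
  have hfuel : N ≤ 0 + (grid.length + 1) := by
    by_contra hcon
    have hlt : (grid.length : Int) * d0 < (grid.length : Int) :=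
      (hN grid.length).mpr (by omega)
    nlinarith
  have hA := pvLoopA_sum grid d0 d1 w hd hw N hN (grid.length + 1) 0 0 hfuel
  simp only [Nat.cast_zero, zero_mul] at hA
  have hmod0 : PySem.Int.mod 0 w = 0 := by
    rw [PySem.Int.mod_eq_emod_of_pos hw]; exact Int.zero_emod w
  rw [hmod0] at hA
  rw [hA, Nat.sub_zero, ← List.range_eq_range', pvSumRange, zero_add]
  -- B side: the gcd loop, the period, and its divisibility facts
  have hwcast : ((w.toNat : Int)) = w := Int.toNat_of_nonneg (le_of_lt hw)
  have hgpos : (0 : Int) < ((pvGcdLoop w.toNat (PySem.Int.mod d1 w).toNat : Nat) : Int) := by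
    rw [pvGcdLoop_eq]
    exact_mod_cast Nat.gcd_pos_of_pos_right _ (by omega)
  have hgdvdw : ((pvGcdLoop w.toNat (PySem.Int.mod d1 w).toNat : Nat) : Int) ∣ w := by
    rw [pvGcdLoop_eq]
    conv_rhs => rw [← hwcast]
    exact_mod_cast Nat.gcd_dvd_right _ _
  have hemodcast : (((PySem.Int.mod d1 w).toNat : Int)) = PySem.Int.mod d1 w := by
    rw [PySem.Int.mod_eq_emod_of_pos hw]
    exact Int.toNat_of_nonneg (Int.emod_nonneg d1 (ne_of_gt hw))
  have hgdvdd1 : ((pvGcdLoop w.toNat (PySem.Int.mod d1 w).toNat : Nat) : Int) ∣ d1 := by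
    have h2 : ((pvGcdLoop w.toNat (PySem.Int.mod d1 w).toNat : Nat) : Int) ∣ d1 % w := by
      rw [← PySem.Int.mod_eq_emod_of_pos hw, pvGcdLoop_eq]
      conv_rhs => rw [← hemodcast]
      exact_mod_cast Nat.gcd_dvd_left _ _
    have h4 := dvd_add (Dvd.dvd.mul_right hgdvdw (d1 / w)) h2
    rwa [Int.mul_ediv_add_emod] at h4
  have hpg : PySem.Int.floordiv w ((pvGcdLoop w.toNat (PySem.Int.mod d1 w).toNat : Nat) : Int)
        * ((pvGcdLoop w.toNat (PySem.Int.mod d1 w).toNat : Nat) : Int) = w := by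
    rw [PySem.Int.floordiv_eq_ediv_of_pos hgpos]
    exact Int.ediv_mul_cancel hgdvdw
  have hppos : 0 < PySem.Int.floordiv w ((pvGcdLoop w.toNat (PySem.Int.mod d1 w).toNat : Nat) : Int) := by
    nlinarith
  have hwdvd : w ∣ PySem.Int.floordiv w ((pvGcdLoop w.toNat (PySem.Int.mod d1 w).toNat : Nat) : Int) * d1 := by
    obtain ⟨t, ht⟩ := hgdvdd1
    refine ⟨t, ?_⟩
    calc PySem.Int.floordiv w ((pvGcdLoop w.toNat (PySem.Int.mod d1 w).toNat : Nat) : Int) * d1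
        = PySem.Int.floordiv w ((pvGcdLoop w.toNat (PySem.Int.mod d1 w).toNat : Nat) : Int)
            * (((pvGcdLoop w.toNat (PySem.Int.mod d1 w).toNat : Nat) : Int) * t) :=
          congrArg (HMul.hMul (PySem.Int.floordiv w
            ((pvGcdLoop w.toNat (PySem.Int.mod d1 w).toNat : Nat) : Int))) ht
      _ = PySem.Int.floordiv w ((pvGcdLoop w.toNat (PySem.Int.mod d1 w).toNat : Nat) : Int)
            * ((pvGcdLoop w.toNat (PySem.Int.mod d1 w).toNat : Nat) : Int) * t := by ring
      _ = w * t := by rw [hpg]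
  rw [pvBsideEval grid d0 d1 w
      (PySem.Int.floordiv w ((pvGcdLoop w.toNat (PySem.Int.mod d1 w).toNat : Nat) : Int)) N
      hd hw hN hppos hwdvd]
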